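-- pv_equiv track=rewrite | github.com/GJuceviciute/Coding-test | second lowest frequency.py | secondLowest
-- ===== SOURCE A (Python) =====
-- def secondLowest(nums):
--     # assumes an array/list is not empty
--     set_nums = set(nums)
--     if len(set_nums) == 1:
--         return nums[0]
--     nums.sort()
--     if len(set_nums) == len(nums):
--         return nums[1]
--     d = {}
--     for i in nums:
--         if i in d:
--             d[i] += 1
--         else:
--             d[i] = 1
--     frequencies = sorted(set(d.values()))
--     if len(frequencies) == 1:
--         second_lowest_frequency = frequencies[0]
--     else:
--         second_lowest_frequency = frequencies[1]
--     low_frequency_elements = sorted([i for i in d if d[i] == second_lowest_frequency])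
--     if len(low_frequency_elements) == 1:
--         return low_frequency_elements[0]
--     return low_frequency_elements[1]
-- ===== SOURCE B (Python) =====
-- def _two_smallest(it):
--     # returns the two smallest distinct values of it (None where absent)
--     a = b = None
--     for c in it:
--         if a is None or c < a:
--             b = a
--             a = c
--         elif c != a and (b is None or c < b):
--             b = c
--     return a, b
--
--
-- def secondLowest(nums):
--     counts = {}
--     for x in nums:
--         counts[x] = counts.get(x, 0) + 1
--     f1, f2 = _two_smallest(counts.values())
--     target = f1 if f2 is None else f2
--     v1, v2 = _two_smallest(x for x, c in counts.items() if c == target)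
--     return v1 if v2 is None else v2
-- ===== Notes on version B (the rewrite author's own statement) =====
-- stated objective: faster
-- what changed: B replaces A's two full sorts (of the list and of the frequency/value candidates) by a single hash-counting pass plus linear 'two smallest distinct' scans over the frequencies and over the values at the chosen frequency.
import Mathlib
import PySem

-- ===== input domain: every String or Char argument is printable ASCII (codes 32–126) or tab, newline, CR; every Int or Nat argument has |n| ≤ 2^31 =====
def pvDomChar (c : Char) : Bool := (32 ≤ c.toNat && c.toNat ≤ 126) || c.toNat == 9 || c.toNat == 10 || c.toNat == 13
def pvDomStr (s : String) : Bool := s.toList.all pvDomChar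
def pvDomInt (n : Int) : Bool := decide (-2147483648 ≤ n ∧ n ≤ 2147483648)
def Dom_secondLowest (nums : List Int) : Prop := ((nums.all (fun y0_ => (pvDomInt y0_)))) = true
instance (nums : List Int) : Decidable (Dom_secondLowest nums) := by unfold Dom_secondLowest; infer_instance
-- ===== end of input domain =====

-- B replaces A's sorting passes by one hash-counting pass plus linear two-smallest scans; return
-- values are proved equal on nonempty lists.  (The Python A sorts its argument in place; B does not
-- mutate — the equivalence proved here is about the return value only.)

-- ===== PORT A =====
def secondLowest (nums : List Int) : Int :=
  let set_nums : PySem.Set Int := PySem.Set.ofList nums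
  if set_nums.length = 1 then (PySem.List.pyGet? nums 0).getD 0
  else
    let nums' := PySem.List.sorted nums (fun x => x)
    if set_nums.length = nums'.length then (PySem.List.pyGet? nums' 1).getD 0
    else
      let d : PySem.Dict Int Int := nums'.foldl
        (fun d i => if d.contains i then d.insert i (d.getD i 0 + 1) else d.insert i 1)
        PySem.Dict.empty
      let frequencies := PySem.List.sorted (PySem.Set.ofList d.values) (fun x => x)
      let slf := if frequencies.length = 1 then (PySem.List.pyGet? frequencies 0).getD 0
                 else (PySem.List.pyGet? frequencies 1).getD 0
      let lfe := PySem.List.sorted (d.keys.filter (fun i => d.getD i 0 == slf)) (fun x => x)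
      if lfe.length = 1 then (PySem.List.pyGet? lfe 0).getD 0
      else (PySem.List.pyGet? lfe 1).getD 0

-- ===== PORT B =====
-- helper `_two_smallest` of Source B: running (smallest, second-smallest-distinct) pair
def tsStep (p : Option Int × Option Int) (c : Int) : Option Int × Option Int :=
  match p.1 with
  | none => (some c, p.1)
  | some a =>
    if c < a then (some c, p.1)
    else if c ≠ a then
      match p.2 with
      | none => (p.1, some c)
      | some b => if c < b then (p.1, some c) else p
    else p

def twoSmallest (l : List Int) : Option Int × Option Int := l.foldl tsStep (none, none)

def secondLowest_alt (nums : List Int) : Int :=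
  let counts : PySem.Dict Int Int :=
    nums.foldl (fun d x => d.insert x (d.getD x 0 + 1)) PySem.Dict.empty
  let fs := twoSmallest counts.values
  let target : Int := match fs.2 with | none => fs.1.getD 0 | some t => t
  let vs := twoSmallest ((counts.items.filter (fun p => p.2 == target)).map (·.1))
  match vs.2 with | none => vs.1.getD 0 | some v => v

-- ===== PRECONDITION & SPEC =====
-- Pre_ excludes only the empty list, on which the Python A raises IndexError (nums[1]).
def Pre_secondLowest (nums : List Int) : Prop := nums ≠ []
instance (nums : List Int) : Decidable (Pre_secondLowest nums) := by unfold Pre_secondLowest; infer_instance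
def pvWitness_secondLowest : List Int := [5, 5, 2, 3, 3, 3]

def Spec_secondLowest (nums : List Int) (out : Int) : Prop := out = secondLowest_alt nums
instance (nums : List Int) (out : Int) : Decidable (Spec_secondLowest nums out) := by unfold Spec_secondLowest; infer_instance

-- ===== CLAIM (what is proved, stated in full; the proofs are below) =====
def Claim_equal_secondLowest : Prop := ∀ (nums : List Int), Dom_secondLowest nums → Pre_secondLowest nums → Spec_secondLowest nums (secondLowest nums)

-- ===== LEMMAS AND PROOFS =====

-- the second-smallest distinct element, as an Option
def sndMin (l : List Int) : Option Int :=
  match l.min? with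
  | none => none
  | some m => (l.filter (fun x => decide (m < x))).min?

-- Source B's final `v1 if v2 is None else v2`
def pick2 (o : Option Int × Option Int) : Int :=
  match o.2 with | none => o.1.getD 0 | some v => v

-- common reference form of the answer (used only in the proofs)
def refOut (nums : List Int) : Int :=
  let vals := (PySem.Dict.counter nums).values
  let f := pick2 (vals.min?, sndMin vals)
  let L := ((PySem.Dict.counter nums).items.filter (fun p => p.2 == f)).map (·.1)
  pick2 (L.min?, sndMin L)

lemma min?_append_singleton (t : List Int) (c : Int) :
    (t ++ [c]).min? = some (match t.min? with | none => c | some b => min b c) := by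
  induction t with
  | nil => simp
  | cons a t ih => simp [List.min?_cons, ih]; cases h : t.min? <;> simp [h]

lemma ts_spec (l : List Int) : twoSmallest l = (l.min?, sndMin l) := by
  induction l using List.reverseRecOn with
  | nil => simp [twoSmallest, sndMin]
  | append_singleton t c ih =>
    unfold twoSmallest at ih ⊢
    rw [List.foldl_append, ih]
    cases hm : t.min? with
    | none =>
      rw [List.min?_eq_none_iff] at hm; subst hm
      simp [tsStep, sndMin, List.min?]
    | some m =>
      have hmem := (List.min?_eq_some_iff (xs := t) (a := m)).mp hm
      rw [min?_append_singleton]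
      simp only [hm]
      by_cases hc : c < m
      · have hmin : min m c = c := by omega
        have hfilt : t.filter (fun x => decide (c < x)) = t :=
          List.filter_eq_self.mpr (fun x hx => by
            have := hmem.2 x hx; simp; omega)
        simp only [sndMin, hm, min?_append_singleton, hmin, hfilt, List.filter_append]
        simp [tsStep, hc, List.filter, hm]
      · by_cases he : c = m
        · subst he
          have hmin : min c c = c := by omega
          simp only [sndMin, hm, min?_append_singleton, hmin, List.filter_append]
          simp [tsStep, hc, List.filter, show ¬ (c < c) by omega]
        · have hmc : m < c := by omega
          have hmin : min m c = m := by omega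
          simp only [sndMin, hm, min?_append_singleton, hmin, List.filter_append]
          have hfc : List.filter (fun x => decide (m < x)) [c] = [c] := by
            simp [List.filter, hmc]
          rw [hfc, min?_append_singleton]
          cases hs : (t.filter (fun x => decide (m < x))).min? with
          | none => simp [tsStep, hs, hc, he]
          | some b =>
            by_cases hcb : c < b
            · simp [tsStep, hs, hc, he, hcb, show min b c = c by omega]
            · simp [tsStep, hs, hc, he, hcb, show min b c = b by omega]

lemma pairwise_lt_of_le_nodup {u : List Int} (h1 : u.Pairwise (· ≤ ·)) (h2 : u.Nodup) :
    u.Pairwise (· < ·) := by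
  have := h1.and h2
  exact this.imp (fun h => lt_of_le_of_ne h.1 h.2)

-- a strictly increasing list with the same members as l starts with l's two smallest distinct values
lemma strict_get01 {u l : List Int} (hp : u.Pairwise (· < ·)) (h : ∀ x, x ∈ u ↔ x ∈ l) :
    u[0]? = l.min? ∧ u[1]? = sndMin l := by
  cases u with
  | nil =>
    have hl : l = [] := by
      rw [List.eq_nil_iff_forall_not_mem]
      intro x hx; exact (List.not_mem_nil (a := x)).elim ((h x).mpr hx)
    subst hl; simp [sndMin]
  | cons a rest =>
    have ha : a ∈ l := (h a).mp List.mem_cons_self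
    have hale : ∀ b ∈ l, a ≤ b := by
      intro b hb
      rcases List.mem_cons.mp ((h b).mpr hb) with h1 | h2
      · omega
      · exact le_of_lt (List.rel_of_pairwise_cons hp h2)
    have hmin : l.min? = some a := List.min?_eq_some_iff.mpr ⟨ha, hale⟩
    refine ⟨by simp [hmin], ?_⟩
    unfold sndMin
    rw [hmin]
    cases rest with
    | nil =>
      have : l.filter (fun x => decide (a < x)) = [] := by
        rw [List.filter_eq_nil_iff]
        intro x hx
        have : x = a := by
          have := (h x).mpr hx; simp at this; exact this
        simp [this]
      simp [this]
    | cons b rest2 =>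
      have hab : a < b := List.rel_of_pairwise_cons hp List.mem_cons_self
      have hb : b ∈ l := (h b).mp (by simp)
      have : (l.filter (fun x => decide (a < x))).min? = some b := by
        rw [List.min?_eq_some_iff]
        constructor
        · rw [List.mem_filter]; exact ⟨hb, by simp [hab]⟩
        · intro x hx
          rw [List.mem_filter] at hx
          have hxu := (h x).mpr hx.1
          have hax : a < x := by simpa using hx.2
          rcases List.mem_cons.mp hxu with h1 | h2
          · omega
          · rcases List.mem_cons.mp h2 with h2 | h3
            · omega
            · exact le_of_lt (List.rel_of_pairwise_cons (List.Pairwise.sublist (by simp) hp) h3)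
      simp [this]

lemma nodup_of_ofList_length {xs : List Int} (h : (PySem.Set.ofList xs).length = xs.length) :
    xs.Nodup := by
  induction xs with
  | nil => exact List.nodup_nil
  | cons x t ih =>
    rw [PySem.Set.ofList_cons] at h
    simp only [List.length_cons] at h
    have hd : ((PySem.Set.ofList t).discard x).length ≤ (PySem.Set.ofList t).length := by
      simp [PySem.Set.discard, List.length_filter_le]
    have ht : (PySem.Set.ofList t).length ≤ t.length := PySem.Set.length_ofList_le t
    have heq : (PySem.Set.ofList t).length = t.length := by omega
    have hxnot : x ∉ t := by
      intro hx
      have hmem : x ∈ PySem.Set.ofList t := (PySem.Set.mem_ofList _ _).mpr hx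
      have : ((PySem.Set.ofList t).discard x).length < (PySem.Set.ofList t).length := by
        simp only [PySem.Set.discard]
        exact List.length_filter_lt_length_iff_exists.mpr ⟨x, hmem, by simp⟩
      omega
    exact List.Nodup.cons hxnot (ih heq)

lemma pick_eq {u l : List Int} (hp : u.Pairwise (· < ·)) (hmem : ∀ x, x ∈ u ↔ x ∈ l)
    (hne : l ≠ []) :
    (if u.length = 1 then (PySem.List.pyGet? u 0).getD 0 else (PySem.List.pyGet? u 1).getD 0)
      = pick2 (l.min?, sndMin l) := by
  obtain ⟨h0, h1⟩ := strict_get01 hp hmem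
  obtain ⟨m, hm⟩ : ∃ m, l.min? = some m := by
    cases hl : l.min? with
    | none => exact absurd (List.min?_eq_none_iff.mp hl) hne
    | some m => exact ⟨m, rfl⟩
  have hu0 : u[0]? = some m := by rw [h0, hm]
  have hlen0 : 0 < u.length := by
    rcases List.getElem?_eq_some_iff.mp hu0 with ⟨h, _⟩; omega
  cases hs : sndMin l with
  | none =>
    have hlen1 : u.length ≤ 1 := List.getElem?_eq_none_iff.mp (by rw [h1, hs])
    have : u.length = 1 := by omega
    simp only [this, if_pos rfl, pick2, hm, hs]
    simp [pysem, hu0]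
  | some w =>
    have hu1 : u[1]? = some w := by rw [h1, hs]
    have hlen2 : 1 < u.length := by
      rcases List.getElem?_eq_some_iff.mp hu1 with ⟨h, _⟩; omega
    have : u.length ≠ 1 := by omega
    simp only [this, if_neg this, pick2, hs]
    simp [pysem, hu1]

lemma B_eq_ref (nums : List Int) : secondLowest_alt nums = refOut nums := by
  simp only [secondLowest_alt, refOut, pick2,
    PySem.Dict.foldl_insert_getD_add_one_eq_counter, ts_spec]


-- values of a counter dict, as counts over the distinct elements
lemma values_counter_eq (xs : List Int) :
    (PySem.Dict.counter xs).values
      = (PySem.Set.ofList xs).map (fun k => ((xs.count k : Int))) := by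
  simp [PySem.Dict.values, PySem.Dict.items_counter]

lemma A_eq_ref (nums : List Int) (hne : nums ≠ []) : secondLowest nums = refOut nums := by
  have hmemS : ∀ x : Int, x ∈ PySem.Set.ofList nums ↔ x ∈ nums :=
    fun x => PySem.Set.mem_ofList nums x
  simp only [secondLowest]
  by_cases h1 : (PySem.Set.ofList nums).length = 1
  · -- all elements equal
    rw [if_pos h1]
    obtain ⟨a, ha⟩ := List.length_eq_one_iff.mp h1
    have hall : ∀ x ∈ nums, x = a := by
      intro x hx
      have := (hmemS x).mpr hx
      rw [ha] at this; simpa using this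
    obtain ⟨y, t, rfl⟩ := List.exists_cons_of_ne_nil hne
    have hy : y = a := hall y List.mem_cons_self
    subst hy
    have hA : (PySem.List.pyGet? (y :: t) 0).getD 0 = y := by simp [pysem]
    rw [hA]
    simp only [refOut, values_counter_eq, PySem.Dict.items_counter, ha]
    simp [pick2, sndMin, List.min?, List.filter]
  · rw [if_neg h1]
    by_cases h2 : (PySem.Set.ofList nums).length = (PySem.List.sorted nums (fun x => x)).length
    · -- all elements distinct: A returns sorted(nums)[1]
      rw [if_pos h2]
      have hperm : (PySem.List.sorted nums (fun x => x)).Perm nums :=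
        PySem.List.sorted_perm nums (fun x => x) false
      have hlen : (PySem.Set.ofList nums).length = nums.length := by
        rw [h2, hperm.length_eq]
      have hnd : nums.Nodup := nodup_of_ofList_length hlen
      have hS : PySem.Set.ofList nums = nums := PySem.Set.ofList_eq_self_of_nodup nums hnd
      have hcnt1 : ∀ k ∈ nums, nums.count k = 1 := by
        intro k hk
        have ha' := List.nodup_iff_count_le_one.mp hnd k
        have hb' := List.count_pos_iff.mpr hk
        omega
      have hvals : (PySem.Dict.counter nums).values = nums.map (fun _ => (1:Int)) := by
        rw [values_counter_eq, hS]
        exact List.map_congr_left (fun k hk => by simp [hcnt1 k hk])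
      obtain ⟨y, t, hyt⟩ := List.exists_cons_of_ne_nil hne
      have hvmin : (nums.map (fun _ => (1:Int))).min? = some 1 := by
        rw [List.min?_eq_some_iff]
        constructor
        · rw [hyt]; simp
        · intro b hb; rcases List.mem_map.mp hb with ⟨_, _, rfl⟩; omega
      have hvsnd : sndMin (nums.map (fun _ => (1:Int))) = none := by
        unfold sndMin; rw [hvmin]
        rw [List.min?_eq_none_iff, List.filter_eq_nil_iff]
        intro x hx; rcases List.mem_map.mp hx with ⟨_, _, rfl⟩; norm_num
      have hitems : (PySem.Dict.counter nums).items = nums.map (fun k => (k, (nums.count k : Int))) := by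
        rw [PySem.Dict.items_counter, hS]
      have hL : (((PySem.Dict.counter nums).items.filter (fun p => p.2 == (1:Int))).map (·.1)) = nums := by
        rw [hitems, List.filter_map]
        have hfeq : nums.filter ((fun p : Int × Int => p.2 == (1:Int)) ∘ (fun k => (k, (nums.count k : Int)))) = nums := by
          rw [List.filter_eq_self]
          intro k hk; simp [Function.comp, hcnt1 k hk]
        rw [hfeq, List.map_map]
        have hid : ((fun x : Int × Int => x.1) ∘ fun k : Int => (k, (nums.count k : Int))) = id := rfl
        rw [hid, List.map_id]
      simp only [refOut, hvals, hvmin, hvsnd, pick2, Option.getD_some]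
      rw [hL]
      -- now compare sorted(nums)[1] with pick2 (nums.min?, sndMin nums)
      have hp : (PySem.List.sorted nums (fun x => x)).Pairwise (· < ·) :=
        pairwise_lt_of_le_nodup (PySem.List.sorted_pairwise nums (fun x => x))
          (hperm.nodup_iff.mpr hnd)
      have hmemu : ∀ x, x ∈ PySem.List.sorted nums (fun x => x) ↔ x ∈ nums :=
        fun x => hperm.mem_iff
      obtain ⟨hg0, hg1⟩ := strict_get01 hp hmemu
      have hlen2 : 1 < (PySem.List.sorted nums (fun x => x)).length := by
        rw [hperm.length_eq]
        have hne1 : nums.length ≠ 1 := by rw [← hlen]; exact h1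
        have hpos : 0 < nums.length := List.length_pos_of_ne_nil hne
        omega
      have hg : (PySem.List.sorted nums (fun x => x))[1]? = some ((PySem.List.sorted nums (fun x => x))[1]'hlen2) :=
        List.getElem?_eq_getElem hlen2
      rw [hg] at hg1
      rw [← hg1]
      simp [pysem, hg]
    · -- general case: duplicate elements present
      rw [if_neg h2]
      have hperm : (PySem.List.sorted nums (fun x => x)).Perm nums :=
        PySem.List.sorted_perm nums (fun x => x) false
      have hd : (PySem.List.sorted nums (fun x => x)).foldl
          (fun d i => if d.contains i then d.insert i (d.getD i 0 + 1) else d.insert i 1)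
          PySem.Dict.empty = PySem.Dict.counter (PySem.List.sorted nums (fun x => x)) := by
        rw [← PySem.Dict.foldl_insert_getD_add_one_eq_counter]
        apply PySem.List.foldl_congr_mem
        intro acc x hx
        cases hc : acc.contains x with
        | true => simp [hc]
        | false =>
          rw [if_neg (by simp [hc]), PySem.Dict.getD_of_not_contains acc 0 hc]
          norm_num
      rw [hd]
      have hcnt : ∀ k : Int, (PySem.List.sorted nums (fun x => x)).count k = nums.count k :=
        fun k => hperm.count_eq k
      have hvals : (PySem.Dict.counter (PySem.List.sorted nums (fun x => x))).values
          = (PySem.Set.ofList (PySem.List.sorted nums (fun x => x))).map (fun k => (nums.count k : Int)) := by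
        rw [values_counter_eq]
        exact List.map_congr_left (fun k _ => by rw [hcnt k])
      have hVmem : ∀ x, x ∈ (PySem.Dict.counter nums).values ↔
          ∃ k ∈ nums, (nums.count k : Int) = x := by
        intro x; rw [values_counter_eq]; simp only [List.mem_map]
        constructor
        · rintro ⟨k, hk, rfl⟩; exact ⟨k, (hmemS k).mp hk, rfl⟩
        · rintro ⟨k, hk, rfl⟩; exact ⟨k, (hmemS k).mpr hk, rfl⟩
      have hfreqmem : ∀ x, x ∈ PySem.List.sorted (PySem.Set.ofList (PySem.Dict.counter (PySem.List.sorted nums (fun x => x))).values) (fun x => x) ↔ x ∈ (PySem.Dict.counter nums).values := by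
        intro x
        rw [(PySem.List.sorted_perm _ _ _).mem_iff, PySem.Set.mem_ofList, hvals, hVmem x]
        simp only [List.mem_map]
        constructor
        · rintro ⟨k, hk, rfl⟩
          exact ⟨k, hperm.mem_iff.mp ((PySem.Set.mem_ofList _ k).mp hk), rfl⟩
        · rintro ⟨k, hk, rfl⟩
          exact ⟨k, (PySem.Set.mem_ofList _ k).mpr (hperm.mem_iff.mpr hk), rfl⟩
      have hfreqlt : (PySem.List.sorted (PySem.Set.ofList (PySem.Dict.counter (PySem.List.sorted nums (fun x => x))).values) (fun x => x)).Pairwise (· < ·) :=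
        pairwise_lt_of_le_nodup (PySem.List.sorted_pairwise _ _)
          ((PySem.List.sorted_perm _ _ _).nodup_iff.mpr (PySem.Set.nodup_ofList _))
      have hVne : (PySem.Dict.counter nums).values ≠ [] := by
        obtain ⟨y, t, hyt⟩ := List.exists_cons_of_ne_nil hne
        have hy : y ∈ nums := by rw [hyt]; exact List.mem_cons_self
        exact List.ne_nil_of_mem ((hVmem _).mpr ⟨y, hy, rfl⟩)
      have hslf := pick_eq hfreqlt hfreqmem hVne
      have hfmem : pick2 ((PySem.Dict.counter nums).values.min?, sndMin (PySem.Dict.counter nums).values) ∈ (PySem.Dict.counter nums).values := by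
        cases hs : sndMin (PySem.Dict.counter nums).values with
        | none =>
          obtain ⟨m, hm⟩ : ∃ m, (PySem.Dict.counter nums).values.min? = some m := by
            cases hmm : (PySem.Dict.counter nums).values.min? with
            | none => exact absurd (List.min?_eq_none_iff.mp hmm) hVne
            | some m => exact ⟨m, rfl⟩
          simp only [pick2, hs, hm, Option.getD_some]
          exact (List.min?_eq_some_iff.mp hm).1
        | some w =>
          simp only [pick2, hs]
          unfold sndMin at hs
          cases hmm : (PySem.Dict.counter nums).values.min? with
          | none => rw [hmm] at hs; simp at hs
          | some m =>
            rw [hmm] at hs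
            exact (List.mem_filter.mp (List.min?_eq_some_iff.mp hs).1).1
      simp only [refOut]
      simp only [hslf]
      set F := pick2 ((PySem.Dict.counter nums).values.min?, sndMin (PySem.Dict.counter nums).values) with hF
      have hAfilter : (PySem.Dict.counter (PySem.List.sorted nums (fun x => x))).keys.filter
            (fun i => (PySem.Dict.counter (PySem.List.sorted nums (fun x => x))).getD i 0 == F)
          = (PySem.Set.ofList (PySem.List.sorted nums (fun x => x))).filter
            (fun k => ((nums.count k : Int) == F)) := by
        simp only [PySem.Dict.keys_counter, PySem.Dict.getD_counter, hcnt]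
      have hLval : (((PySem.Dict.counter nums).items.filter (fun p => p.2 == F)).map (·.1))
          = (PySem.Set.ofList nums).filter (fun k => ((nums.count k : Int) == F)) := by
        rw [PySem.Dict.items_counter, List.filter_map, List.map_map]
        have hc1 : ((fun x : Int × Int => x.1) ∘ fun k : Int => (k, (nums.count k : Int))) = id := rfl
        have hc2 : ((fun p : Int × Int => p.2 == F) ∘ fun k : Int => (k, (nums.count k : Int)))
            = fun k : Int => ((nums.count k : Int) == F) := rfl
        rw [hc1, hc2, List.map_id]
      rw [hAfilter, hLval]
      have hlfemem : ∀ x, x ∈ PySem.List.sorted ((PySem.Set.ofList (PySem.List.sorted nums (fun x => x))).filter (fun k => ((nums.count k : Int) == F))) (fun x => x)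
          ↔ x ∈ (PySem.Set.ofList nums).filter (fun k => ((nums.count k : Int) == F)) := by
        intro x
        rw [(PySem.List.sorted_perm _ _ _).mem_iff, List.mem_filter, List.mem_filter,
            PySem.Set.mem_ofList, PySem.Set.mem_ofList, hperm.mem_iff]
      have hlfelt : (PySem.List.sorted ((PySem.Set.ofList (PySem.List.sorted nums (fun x => x))).filter (fun k => ((nums.count k : Int) == F))) (fun x => x)).Pairwise (· < ·) :=
        pairwise_lt_of_le_nodup (PySem.List.sorted_pairwise _ _)
          ((PySem.List.sorted_perm _ _ _).nodup_iff.mpr ((PySem.Set.nodup_ofList _).filter _))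
      have hLne : (PySem.Set.ofList nums).filter (fun k => ((nums.count k : Int) == F)) ≠ [] := by
        obtain ⟨k, hk, hkF⟩ := (hVmem F).mp hfmem
        apply List.ne_nil_of_mem (a := k)
        rw [List.mem_filter, PySem.Set.mem_ofList]
        exact ⟨hk, by simp [hkF]⟩
      exact pick_eq hlfelt hlfemem hLne

-- ===== VERDICT (by name: the statement is the Claim_ definition above) =====
theorem secondLowest_spec : Claim_equal_secondLowest := by
  intro nums _ hne
  unfold Spec_secondLowest
  rw [A_eq_ref nums hne, B_eq_ref nums]
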